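-- pv_equiv track=rewrite | github.com/kaleyjoss/PCX_dashboard_stable | app-fromonline.py | _underscores
-- ===== SOURCE A (Python) =====
-- def _underscores(text):
--     parts = text.split('_')
--     result = []
--
--     for i, part in enumerate(parts):
--         result.append(part)
--         if i < len(parts) - 1:
--             if i % 2 == 0:
--                 result.append(' ')
--             else:
--                 result.append('<br>')
--
--     return ''.join(result)
-- ===== SOURCE B (Python) =====
-- def _underscores(text):
--     out = []
--     count = 0
--     for ch in text:
--         if ch == '_':
--             out.append(' ' if count % 2 == 0 else '<br>')
--             count += 1
--         else:
--             out.append(ch)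
--     return ''.join(out)
-- ===== Notes on version B (the rewrite author's own statement) =====
-- stated objective: simpler
-- what changed: Single character scan with an underscore counter choosing each separator by parity replaces the split-then-enumerate loop that rebuilds the string with positional separator logic.
import Mathlib
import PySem

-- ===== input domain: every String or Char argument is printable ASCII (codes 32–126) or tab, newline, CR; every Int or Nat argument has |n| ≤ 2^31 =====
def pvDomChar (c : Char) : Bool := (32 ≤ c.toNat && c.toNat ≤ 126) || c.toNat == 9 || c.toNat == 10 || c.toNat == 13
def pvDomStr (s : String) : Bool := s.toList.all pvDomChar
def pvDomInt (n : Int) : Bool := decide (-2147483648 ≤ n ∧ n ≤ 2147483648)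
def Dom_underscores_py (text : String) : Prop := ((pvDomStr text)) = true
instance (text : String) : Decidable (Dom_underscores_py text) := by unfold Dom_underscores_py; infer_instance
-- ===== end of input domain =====

-- B replaces the split-then-enumerate rebuild with a single character scan that counts
-- underscores and picks each separator by the counter's parity (objective: simpler).

-- ===== PORT A =====
def underscores_py (text : String) : String :=
  let parts := PySem.Chars.splitOn text.toList ['_']
  let result : List (List Char) :=
    (PySem.List.enumerate parts).foldl
      (fun acc ip =>
        let acc := acc ++ [ip.2]
        if ip.1 < (parts.length : Int) - 1 then
          if PySem.Int.mod ip.1 2 = 0 then acc ++ [[' ']] else acc ++ [['<','b','r','>']]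
        else acc) []
  String.ofList (PySem.Chars.join [] result)

-- ===== PORT B =====
def underscores_py_alt (text : String) : String :=
  String.ofList
    (text.toList.foldl
      (fun (st : List Char × Nat) c =>
        if c = '_' then
          (st.1 ++ (if st.2 % 2 = 0 then [' '] else ['<','b','r','>']), st.2 + 1)
        else (st.1 ++ [c], st.2))
      ([], 0)).1

-- ===== PRECONDITION & SPEC =====
def Spec_underscores_py (text : String) (out : String) : Prop := out = underscores_py_alt text
instance (text : String) (out : String) : Decidable (Spec_underscores_py text out) := by unfold Spec_underscores_py; infer_instance

-- ===== CLAIM (what is proved, stated in full; the proofs are below) =====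
def Claim_equal_underscores_py : Prop := ∀ (text : String), Dom_underscores_py text → Spec_underscores_py text (underscores_py text)

-- ===== LEMMAS AND PROOFS =====

-- the pieces text.split('_') produces, computed structurally
def sp : List Char → List (List Char)
| [] => [[]]
| c :: rest => if c = '_' then [] :: sp rest else
    match sp rest with
    | p :: ps => (c :: p) :: ps
    | [] => [[c]]

theorem sp_ne_nil (l : List Char) : sp l ≠ [] := by
  cases l with
  | nil => simp [sp]
  | cons c rest => simp only [sp]; split_ifs; · simp
                   · cases h : sp rest <;> simp

def consHead (pre : List Char) : List (List Char) → List (List Char)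
| [] => [pre]
| p :: ps => (pre ++ p) :: ps

theorem go_spec (fuel : Nat) : ∀ (l cur : List Char) (acc : List (List Char)), l.length < fuel →
    PySem.Chars.splitOn.go ['_'] fuel l cur acc = acc.reverse ++ consHead cur.reverse (sp l) := by
  induction fuel with
  | zero => intro l cur acc h; omega
  | succ n ih =>
    intro l cur acc h
    cases l with
    | nil => simp [PySem.Chars.splitOn.go, sp, consHead]
    | cons c rest =>
      by_cases hc : c = '_'
      · subst hc
        rw [PySem.Chars.splitOn.go]
        have hp : List.isPrefixOf ['_'] ('_' :: rest) = true := by simp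
        simp only [hp, if_true, List.length_nil, List.length_cons, List.drop_succ_cons,
          List.drop_zero]
        rw [ih rest [] (cur.reverse :: acc) (by simpa using Nat.lt_of_succ_lt_succ h)]
        have hs : sp ('_' :: rest) = [] :: sp rest := by simp [sp]
        rw [hs]
        cases hr : sp rest with
        | nil => exact absurd hr (sp_ne_nil rest)
        | cons p ps => simp [consHead]
      · rw [PySem.Chars.splitOn.go]
        have hp : List.isPrefixOf ['_'] (c :: rest) = false := by
          simp [List.isPrefixOf]; exact fun hh => hc hh.symm
        simp only [hp, Bool.false_eq_true, if_false]
        rw [ih rest (c :: cur) acc (by simpa using Nat.lt_of_succ_lt_succ h)]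
        have hs : sp (c :: rest) = consHead [c] (sp rest) := by
          simp only [sp, hc, if_false]
          cases hr : sp rest <;> simp [consHead]
        rw [hs]
        cases hr : sp rest with
        | nil => exact absurd hr (sp_ne_nil rest)
        | cons p ps => simp [consHead]

theorem splitOn_eq_sp (cs : List Char) : PySem.Chars.splitOn cs ['_'] = sp cs := by
  rw [PySem.Chars.splitOn, go_spec (cs.length + 1) cs [] [] (by omega)]
  cases hr : sp cs with
  | nil => exact absurd hr (sp_ne_nil cs)
  | cons p ps => simp [consHead]

-- separator emitted for the j-th underscore
def sepN (j : Nat) : List Char := if j % 2 = 0 then [' '] else ['<','b','r','>']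

-- the intended output: pieces interleaved with parity-chosen separators
def itl : Nat → List (List Char) → List Char
| _, [] => []
| _, [p] => p
| j, p :: q :: ps => p ++ sepN j ++ itl (j + 1) (q :: ps)

theorem join_nil_flatten (l : List (List Char)) : PySem.Chars.join [] l = l.flatten := by
  simp [PySem.Chars.join, List.intercalate]
  induction l with
  | nil => rfl
  | cons p ps ih => cases ps <;> simp_all [List.intersperse]

theorem int_mod_two (s : Nat) : PySem.Int.mod (s : Int) 2 = ((s % 2 : Nat) : Int) := by
  exact_mod_cast PySem.Int.mod_natCast s 2

theorem a_fold (N : Int) : ∀ (parts : List (List Char)) (s : Nat) (acc : List (List Char)),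
    (s : Int) + parts.length = N →
    ((PySem.List.enumerate parts (s : Int)).foldl
      (fun acc ip =>
        let acc := acc ++ [ip.2]
        if ip.1 < N - 1 then
          if PySem.Int.mod ip.1 2 = 0 then acc ++ [[' ']] else acc ++ [['<','b','r','>']]
        else acc) acc).flatten = acc.flatten ++ itl s parts := by
  intro parts
  induction parts with
  | nil => intro s acc h; simp [PySem.List.enumerate_nil, itl]
  | cons p ps ih =>
    intro s acc h
    rw [PySem.List.enumerate_cons]
    cases ps with
    | nil =>
      have hlt : ¬ ((s : Int) < N - 1) := by simp at h; omega
      simp [PySem.List.enumerate_nil, hlt, itl]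
    | cons q qs =>
      have hlen : ((p :: q :: qs).length : Int) = ((q :: qs).length : Int) + 1 := by
        simp
      have hlen2 : (1 : Int) ≤ ((q :: qs).length : Int) := by
        simp
      have hlt : (s : Int) < N - 1 := by omega
      have h' : ((s + 1 : Nat) : Int) + (q :: qs).length = N := by
        push_cast; push_cast at h hlen; omega
      simp only [List.foldl_cons]
      rw [int_mod_two]
      by_cases hpar : s % 2 = 0
      · simp only [hpar, Nat.cast_zero, if_pos hlt, reduceIte]
        rw [show ((s : Int) + 1) = ((s + 1 : Nat) : Int) by push_cast; ring] at *
        rw [ih (s + 1) _ h']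
        simp [itl, sepN, hpar]
      · have : ¬ (((s % 2 : Nat) : Int) = 0) := by
          intro hh; exact hpar (by exact_mod_cast hh)
        simp only [this, if_false, if_pos hlt]
        rw [show ((s : Int) + 1) = ((s + 1 : Nat) : Int) by push_cast; ring] at *
        rw [ih (s + 1) _ h']
        simp [itl, sepN, hpar]

theorem b_fold : ∀ (cs : List Char) (acc : List Char) (j : Nat),
    (cs.foldl
      (fun (st : List Char × Nat) c =>
        if c = '_' then
          (st.1 ++ (if st.2 % 2 = 0 then [' '] else ['<','b','r','>']), st.2 + 1)
        else (st.1 ++ [c], st.2)) (acc, j)).1 = acc ++ itl j (sp cs) := by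
  intro cs
  induction cs with
  | nil => intro acc j; simp [sp, itl]
  | cons c rest ih =>
    intro acc j
    by_cases hc : c = '_'
    · subst hc
      simp only [List.foldl_cons, reduceIte]
      rw [ih]
      have hs : sp ('_' :: rest) = [] :: sp rest := by simp [sp]
      rw [hs]
      cases hr : sp rest with
      | nil => exact absurd hr (sp_ne_nil rest)
      | cons p ps => simp [itl, sepN]
    · simp only [List.foldl_cons, hc, if_false]
      rw [ih]
      have hs : sp (c :: rest) = consHead [c] (sp rest) := by
        simp only [sp, hc, if_false]
        cases hr : sp rest <;> simp [consHead]
      rw [hs]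
      cases hr : sp rest with
      | nil => exact absurd hr (sp_ne_nil rest)
      | cons p ps =>
        cases ps with
        | nil => simp [consHead, itl]
        | cons q qs => simp [consHead, itl]

-- ===== VERDICT (by name: the statement is the Claim_ definition above) =====
theorem underscores_py_spec : Claim_equal_underscores_py := by
  intro text _
  show underscores_py text = underscores_py_alt text
  simp only [underscores_py, underscores_py_alt, splitOn_eq_sp, join_nil_flatten]
  have ha := a_fold ((sp text.toList).length) (sp text.toList) 0 [] (by simp)
  simp only [Nat.cast_zero] at ha
  rw [ha, b_fold text.toList [] 0]
  simp
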